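-- pv_equiv track=rewrite | github.com/SudM/diff | Environment_Toggle_Drift/toggles.py | build_regex_path_for_toggle
-- ===== SOURCE A (Python) =====
-- def normalize_tenant_name(name: str) -> str:
--     """Normalize tenant names to human-friendly form with WL expansion, hardcoded mappings, and heuristics."""
--     if not name:
--         return name
--
--     lower_name = name.lower()
--
--     # --- Hardcoded special mappings ---
--     special_map = {
--         "wlopenbanking": "White Label Open Banking",
--         "wlexternaloperator": "White Label External Operator",
--         "ibprospect": "IB Prospect",
--         "opendata": "Open Data",
--     }
--     if lower_name in special_map:
--         return special_map[lower_name]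
--
--     # --- Generic WL expansion ---
--     if lower_name.startswith("wl"):
--         rest = name[2:]
--         # Capitalize first letter and try to split if it's a compound
--         return "White Label " + generic_split(rest)
--
--     # --- Generic beautifier ---
--     return generic_split(name)
--
-- def generic_split(word: str) -> str:
--     """
--     Try to split compressed single words into more meaningful tokens.
--     Rules:
--       - Split before uppercase letters
--       - Split known substrings (ib, open, data, bank, prospect, external, operator)
--       - Capitalize each token
--     """
--     lower_word = word.lower()
--
--     # Dictionary-based splitting
--     tokens = []
--     known_tokens = ["ib", "open", "data", "bank", "prospect", "external", "operator"]
--     i = 0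
--     while i < len(lower_word):
--         matched = False
--         for t in sorted(known_tokens, key=len, reverse=True):
--             if lower_word.startswith(t, i):
--                 tokens.append(t.capitalize())
--                 i += len(t)
--                 matched = True
--                 break
--         if not matched:
--             tokens.append(lower_word[i].upper())
--             i += 1
--
--     # Join tokens together with spaces
--     return " ".join(tokens)
--
-- def build_regex_path_for_toggle(tenant_name, nested_names=None, version=None):
--     """
--     Build entitlement-style regex path:
--     Check Permissions*/ *<tenant>*/ [*nested names*/] *Entitlement Check* [*version*]
--     """
--     nested_names = nested_names or []
--
--     parts = []
--     parts.append("Check Permissions*/")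
--
--     if tenant_name:
--         parts.append(f"*{normalize_tenant_name(tenant_name)}*/")
--
--     for n in nested_names:
--         parts.append(f"*{n}*/")
--
--     # Always end with entitlement check
--     parts.append("*Entitlement Check*")
--
--     if version:
--         parts.append(f"*{version}*")
--
--     return "".join(parts)
-- ===== SOURCE B (Python) =====
-- TOKENS = ("prospect", "external", "operator", "open", "data", "bank", "ib")
--
-- SPECIAL = {
--     "wlopenbanking": "White Label Open Banking",
--     "wlexternaloperator": "White Label External Operator",
--     "ibprospect": "IB Prospect",
--     "opendata": "Open Data",
-- }
--
--
-- def generic_split(word):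
--     """Index-then-walk: one pass per token records every position where that
--     token occurs (first/longest token wins via setdefault), then a single walk
--     over the word consumes the index -- no per-position alternation loop."""
--     w = word.lower()
--     starts = {}
--     for t in TOKENS:
--         for j in range(len(w)):
--             if w.startswith(t, j):
--                 starts.setdefault(j, t)
--     out = []
--     i = 0
--     while i < len(w):
--         t = starts.get(i)
--         if t is None:
--             out.append(w[i].upper())
--             i += 1
--         else:
--             out.append(t.capitalize())
--             i += len(t)
--     return " ".join(out)
--
--
-- def normalize_tenant_name(name):
--     if not name:
--         return name
--     low = name.lower()
--     hit = SPECIAL.get(low)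
--     if hit is not None:
--         return hit
--     if low.startswith("wl"):
--         return "White Label " + generic_split(name[2:])
--     return generic_split(name)
--
--
-- def build_regex_path_for_toggle(tenant_name, nested_names=None, version=None):
--     names = ([normalize_tenant_name(tenant_name)] if tenant_name else []) + list(nested_names or [])
--     middle = "".join(f"*{x}*/" for x in names)
--     tail = f"*{version}*" if version else ""
--     return f"Check Permissions*/{middle}*Entitlement Check*{tail}"
-- ===== Notes on version B (the rewrite author's own statement) =====
-- stated objective: alternative
-- what changed: generic_split is re-done as index-then-walk: one substring pass per known token builds a position-to-token dict (setdefault keeps the longest-first winner), and a single walk over the word consumes that index, so the per-position alternation over the token list disappears; the path is assembled as one f-string with a join over a comprehension instead of an appended parts list.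
import Mathlib
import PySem

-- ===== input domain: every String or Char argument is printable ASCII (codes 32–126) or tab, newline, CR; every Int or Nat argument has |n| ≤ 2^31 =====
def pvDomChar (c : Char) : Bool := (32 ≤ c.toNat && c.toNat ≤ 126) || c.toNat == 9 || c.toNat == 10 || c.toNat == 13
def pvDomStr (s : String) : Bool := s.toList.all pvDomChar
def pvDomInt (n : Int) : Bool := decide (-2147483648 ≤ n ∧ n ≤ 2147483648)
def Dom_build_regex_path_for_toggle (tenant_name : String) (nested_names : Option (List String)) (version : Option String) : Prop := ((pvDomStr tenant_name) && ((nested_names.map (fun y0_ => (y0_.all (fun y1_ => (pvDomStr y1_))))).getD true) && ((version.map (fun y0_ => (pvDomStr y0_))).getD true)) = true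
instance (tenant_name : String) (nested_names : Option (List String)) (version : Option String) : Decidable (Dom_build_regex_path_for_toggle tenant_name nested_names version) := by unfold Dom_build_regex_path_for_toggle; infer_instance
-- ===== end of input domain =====

-- B replaces A's per-position token-alternation scan by a two-phase index-then-walk
-- (one substring pass per token builds a position→token map, then a single walk consumes it)
-- and assembles the path by a map/join instead of appended parts (objective: alternative);
-- return values proved equal on the whole domain.

-- ===== PORT A =====
-- Python str.capitalize(): first char title-cased, rest lower-cased (exact on ASCII).
def pvCap (s : List Char) : List Char :=
  match s with
  | [] => []
  | c :: cs => PySem.Chars.upperChar c :: cs.map PySem.Chars.lowerChar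

def knownTokensA : List (List Char) :=
  [['i','b'], ['o','p','e','n'], ['d','a','t','a'], ['b','a','n','k'],
   ['p','r','o','s','p','e','c','t'], ['e','x','t','e','r','n','a','l'],
   ['o','p','e','r','a','t','o','r']]

-- the while-loop of A's generic_split: i is the index, tokens the accumulator;
-- lower_word.startswith(t, i) is ported as startswith on (lw.drop i) (exact for 0 ≤ i),
-- the inner for-with-break as List.find? over the sorted token list (re-sorted each
-- iteration, as in A).  The 'if ht : 0 < t.length' is only a termination guard: it always
-- holds (every known token is nonempty), matching Python where the loop always advances.
def loopA (lw : List Char) (i : Nat) (tokens : List (List Char)) : List (List Char) :=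
  if h : i < lw.length then
    match (PySem.List.sorted knownTokensA (fun t => t.length) true).find?
        (fun t => PySem.Chars.startswith (lw.drop i) t) with
    | some t =>
      if ht : 0 < t.length then loopA lw (i + t.length) (tokens ++ [pvCap t]) else tokens
    | none => loopA lw (i + 1) (tokens ++ [[PySem.Chars.upperChar (lw.getD i ' ')]])
  else tokens
  termination_by lw.length - i
  decreasing_by
  · omega
  · omega

def genericSplitA (word : List Char) : List Char :=
  PySem.Chars.join [' '] (loopA (PySem.Chars.lower word) 0 [])

-- dict-literal membership test + lookup ported as one get? match
def normalizeA (name : List Char) : List Char :=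
  if name = [] then name
  else
    let lower := PySem.Chars.lower name
    let special : PySem.Dict (List Char) (List Char) :=
      ((((PySem.Dict.empty.insert "wlopenbanking".toList "White Label Open Banking".toList).insert
          "wlexternaloperator".toList "White Label External Operator".toList).insert
          "ibprospect".toList "IB Prospect".toList).insert
          "opendata".toList "Open Data".toList)
    match special.get? lower with
    | some v => v
    | none =>
      if PySem.Chars.startswith lower "wl".toList then
        "White Label ".toList ++ genericSplitA (PySem.List.slice name (some 2) none)
      else genericSplitA name

def build_regex_path_for_toggle (tenant_name : String) (nested_names : Option (List String)) (version : Option String) : String :=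
  let nn : List (List Char) := ((nested_names.getD []).map String.toList)
  let parts0 : List (List Char) := [] ++ ["Check Permissions*/".toList]
  let parts1 := if tenant_name.toList ≠ [] then
      parts0 ++ [['*'] ++ normalizeA tenant_name.toList ++ "*/".toList] else parts0
  let parts2 := nn.foldl (fun ps n => ps ++ [['*'] ++ n ++ "*/".toList]) parts1
  let parts3 := parts2 ++ ["*Entitlement Check*".toList]
  let parts4 := match version with
    | some v => if v.toList ≠ [] then parts3 ++ [['*'] ++ v.toList ++ ['*']] else parts3
    | none => parts3
  String.ofList (PySem.Chars.join [] parts4)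

-- ===== PORT B =====
def tokensB : List (List Char) :=
  [['p','r','o','s','p','e','c','t'], ['e','x','t','e','r','n','a','l'],
   ['o','p','e','r','a','t','o','r'], ['o','p','e','n'], ['d','a','t','a'],
   ['b','a','n','k'], ['i','b']]

-- body of B's inner 'for j in range(len(w))' loop: 'if w.startswith(t, j): starts.setdefault(j, t)';
-- w.startswith(t, j) ported as startswith on (w.drop j.toNat) — exact since pyRange yields 0 ≤ j;
-- setdefault = keep the existing entry, else insert.
def posStep (w t : List Char) (d : PySem.Dict Int (List Char)) (j : Int) : PySem.Dict Int (List Char) :=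
  if PySem.Chars.startswith (w.drop j.toNat) t then
    (if d.contains j then d else d.insert j t)
  else d

-- one iteration of B's 'for t in TOKENS' loop
def tokStep (w : List Char) (d : PySem.Dict Int (List Char)) (t : List Char) : PySem.Dict Int (List Char) :=
  (PySem.List.pyRange 0 (w.length : Int)).foldl (posStep w t) d

-- the whole index-building phase ('starts' in Source B)
def buildIdx (w : List Char) : PySem.Dict Int (List Char) :=
  tokensB.foldl (tokStep w) PySem.Dict.empty

-- the walk ('while i < len(w)' in Source B): starts.get(i) drives the step.
-- 'if ht : 0 < t.length' is only a termination guard: every stored value is a known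
-- token, all of which are nonempty — matching Python where the walk always advances.
def walkB (w : List Char) (d : PySem.Dict Int (List Char)) (i : Nat) (out : List (List Char)) : List (List Char) :=
  if h : i < w.length then
    match d.get? (i : Int) with
    | some t =>
      if ht : 0 < t.length then walkB w d (i + t.length) (out ++ [pvCap t]) else out
    | none => walkB w d (i + 1) (out ++ [[PySem.Chars.upperChar (w.getD i ' ')]])
  else out
  termination_by w.length - i
  decreasing_by
  · omega
  · omega

def genericSplitB (word : List Char) : List Char :=
  PySem.Chars.join [' ']
    (walkB (PySem.Chars.lower word) (buildIdx (PySem.Chars.lower word)) 0 [])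

def normalizeB (name : List Char) : List Char :=
  if name = [] then name
  else
    let low := PySem.Chars.lower name
    let special : PySem.Dict (List Char) (List Char) :=
      ((((PySem.Dict.empty.insert "wlopenbanking".toList "White Label Open Banking".toList).insert
          "wlexternaloperator".toList "White Label External Operator".toList).insert
          "ibprospect".toList "IB Prospect".toList).insert
          "opendata".toList "Open Data".toList)
    match special.get? low with
    | some hit => hit
    | none =>
      if PySem.Chars.startswith low "wl".toList then
        "White Label ".toList ++ genericSplitB (PySem.List.slice name (some 2) none)
      else genericSplitB name

def build_regex_path_for_toggle_alt (tenant_name : String) (nested_names : Option (List String)) (version : Option String) : String :=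
  let names : List (List Char) :=
    (if tenant_name.toList ≠ [] then [normalizeB tenant_name.toList] else []) ++
      ((nested_names.getD []).map String.toList)
  let middle := PySem.Chars.join [] (names.map (fun x => ['*'] ++ x ++ "*/".toList))
  let tail := match version with
    | some v => if v.toList ≠ [] then ['*'] ++ v.toList ++ ['*'] else []
    | none => []
  String.ofList ("Check Permissions*/".toList ++ middle ++ "*Entitlement Check*".toList ++ tail)

-- ===== PRECONDITION & SPEC =====
def Spec_build_regex_path_for_toggle (tenant_name : String) (nested_names : Option (List String)) (version : Option String) (out : String) : Prop := out = build_regex_path_for_toggle_alt tenant_name nested_names version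
instance (tenant_name : String) (nested_names : Option (List String)) (version : Option String) (out : String) : Decidable (Spec_build_regex_path_for_toggle tenant_name nested_names version out) := by unfold Spec_build_regex_path_for_toggle; infer_instance

-- ===== CLAIM (what is proved, stated in full; the proofs are below) =====
def Claim_equal_build_regex_path_for_toggle : Prop := ∀ (tenant_name : String) (nested_names : Option (List String)) (version : Option String), Dom_build_regex_path_for_toggle tenant_name nested_names version → Spec_build_regex_path_for_toggle tenant_name nested_names version (build_regex_path_for_toggle tenant_name nested_names version)

-- ===== LEMMAS AND PROOFS =====

theorem tokensB_pos : ∀ t ∈ tokensB, 0 < t.length := by decide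

theorem sortedA_eq_tokensB :
    PySem.List.sorted knownTokensA (fun t => t.length) true = tokensB := by decide

-- effect of one token's position pass on a single lookup
theorem posFold_get? (w t : List Char) (i : Nat) : ∀ (js : List Int) (d : PySem.Dict Int (List Char)),
    (js.foldl (posStep w t) d).get? (i : Int) =
      (match d.get? (i : Int) with
       | some v => some v
       | none =>
         if ((i : Int) ∈ js ∧ PySem.Chars.startswith (w.drop i) t) then some t else none) := by
  intro js
  induction js with
  | nil => intro d; cases hd : d.get? (i : Int) <;> simp [hd]
  | cons j js ih =>
    intro d
    rw [List.foldl_cons, ih]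
    by_cases hij : (i : Int) = j
    · subst hij
      have htn : ((i : Int)).toNat = i := rfl
      unfold posStep
      rw [htn]
      by_cases hs : PySem.Chars.startswith (w.drop i) t
      · rw [if_pos hs]
        rw [PySem.Dict.contains_eq_isSome_get?]
        cases hd : d.get? (i : Int) with
        | some v => simp [hd]
        | none =>
          simp only [Option.isSome_none, Bool.false_eq_true, if_false]
          rw [PySem.Dict.get?_insert]
          simp [hs]
      · rw [if_neg hs]
        cases hd : d.get? (i : Int) with
        | some v => simp [hd]
        | none => simp [hs]
    · have hstep : (posStep w t d j).get? (i : Int) = d.get? (i : Int) := by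
        unfold posStep
        split_ifs with h1 h2
        · rfl
        · rw [PySem.Dict.get?_insert]; simp [hij]
        · rfl
      rw [hstep]
      cases hd : d.get? (i : Int) with
      | some v => simp [hd]
      | none => simp [List.mem_cons, hij]

-- effect of the whole index-building fold on a single in-range lookup
theorem tokFold_get? (w : List Char) (i : Nat) (hi : i < w.length) :
    ∀ (ts : List (List Char)) (d : PySem.Dict Int (List Char)),
      (ts.foldl (tokStep w) d).get? (i : Int) =
        (match d.get? (i : Int) with
         | some v => some v
         | none => ts.find? (fun t => PySem.Chars.startswith (w.drop i) t)) := by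
  intro ts
  induction ts with
  | nil => intro d; cases hd : d.get? (i : Int) <;> simp [hd]
  | cons t ts ih =>
    intro d
    rw [List.foldl_cons, ih]
    unfold tokStep
    rw [posFold_get? w t i]
    have hmem : (i : Int) ∈ PySem.List.pyRange 0 (w.length : Int) := by
      rw [PySem.List.pyRange_zero_natCast]
      exact List.mem_map.mpr ⟨i, List.mem_range.mpr hi, rfl⟩
    cases hd : d.get? (i : Int) with
    | some v => simp [hd]
    | none =>
      by_cases hs : PySem.Chars.startswith (w.drop i) t
      · simp [hmem, hs]
      · simp [hs]

theorem buildIdx_get? (w : List Char) (i : Nat) (hi : i < w.length) :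
    (buildIdx w).get? (i : Int) =
      tokensB.find? (fun t => PySem.Chars.startswith (w.drop i) t) := by
  unfold buildIdx
  rw [tokFold_get? w i hi]
  simp [PySem.Dict.get?, PySem.Dict.empty]

theorem walkB_eq_loopA_aux (n : Nat) : ∀ (lw : List Char) (i : Nat) (acc : List (List Char)),
    lw.length - i ≤ n → walkB lw (buildIdx lw) i acc = loopA lw i acc := by
  induction n with
  | zero =>
    intro lw i acc hle
    rw [walkB, loopA]
    have h : ¬ i < lw.length := by omega
    simp [h]
  | succ m ih =>
    intro lw i acc hle
    rw [walkB, loopA]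
    by_cases h : i < lw.length
    · rw [dif_pos h, dif_pos h, buildIdx_get? lw i h, sortedA_eq_tokensB]
      cases hfind : tokensB.find? (fun t => PySem.Chars.startswith (lw.drop i) t) with
      | some t =>
        have ht := tokensB_pos t (List.mem_of_find?_eq_some hfind)
        simp only [ht, dite_true]
        exact ih lw (i + t.length) _ (by omega)
      | none =>
        exact ih lw (i + 1) _ (by omega)
    · rw [dif_neg h, dif_neg h]

theorem genericSplit_eq (word : List Char) : genericSplitA word = genericSplitB word := by
  unfold genericSplitA genericSplitB
  rw [walkB_eq_loopA_aux (PySem.Chars.lower word).length (PySem.Chars.lower word) 0 []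
    (by omega)]

theorem pvNormalize_eq (name : List Char) : normalizeA name = normalizeB name := by
  simp [normalizeA, normalizeB, genericSplit_eq]

theorem joinNil (xs : List (List Char)) : PySem.Chars.join [] xs = xs.flatten := by
  induction xs with
  | nil => simp [PySem.Chars.join, List.intercalate]
  | cons a l ihl =>
    cases l with
    | nil => simp [PySem.Chars.join_singleton]
    | cons b t => rw [PySem.Chars.join_cons_cons] at *; simp [ihl]

-- ===== VERDICT (by name: the statement is the Claim_ definition above) =====
theorem build_regex_path_for_toggle_spec : Claim_equal_build_regex_path_for_toggle := by
  intro tn nn v _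
  unfold Spec_build_regex_path_for_toggle build_regex_path_for_toggle build_regex_path_for_toggle_alt
  simp only [PySem.List.foldl_append_singleton_eq_map]
  cases v with
  | none =>
    by_cases h : tn.toList = [] <;>
      simp [h, joinNil, pvNormalize_eq, List.flatten_append, List.append_assoc]
  | some s =>
    by_cases h : tn.toList = [] <;> by_cases hv : s.toList = [] <;>
      simp [h, hv, joinNil, pvNormalize_eq, List.flatten_append, List.append_assoc]
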